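-- pv_equiv track=rewrite | github.com/calvincchen/605.645 | Mod3/cchen218.py | find_least_constraining_value
-- ===== SOURCE A (Python) =====
-- def find_least_constraining_value(all_colors, available_colors, current_vertex, neighbors):
-- 	count = {}
-- 	for color in all_colors:
-- 		count[color] = 0
--
-- 	for neighbor in neighbors:
-- 		if neighbor in available_colors:
-- 			for color in available_colors[neighbor]:
-- 				count[color] += 1
-- 	return sorted(count, key=count.get)
-- ===== SOURCE B (Python) =====
-- def find_least_constraining_value(all_colors, available_colors, current_vertex, neighbors):
--     demand = [c for nb in neighbors if nb in available_colors for c in available_colors[nb]]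
--     buckets = [[] for _ in range(len(demand) + 1)]
--     for color in dict.fromkeys(all_colors):
--         buckets[demand.count(color)].append(color)
--     return [color for bucket in buckets for color in bucket]
-- ===== Notes on version B (the rewrite author's own statement) =====
-- stated objective: alternative
-- what changed: B drops the counting dict and the comparison sort entirely: it flattens the neighbors' available-color lists into one demand list, then distributes the (deduplicated) colors into buckets indexed by demand.count(color) and concatenates the buckets, i.e. a bucket/counting sort that preserves the stable all_colors tie order.
-- outside the precondition, e.g. on find_least_constraining_value(['r'], {'v': ['g']}, 'u', ['v']): A raises KeyError, B returns ['r']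
import Mathlib
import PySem

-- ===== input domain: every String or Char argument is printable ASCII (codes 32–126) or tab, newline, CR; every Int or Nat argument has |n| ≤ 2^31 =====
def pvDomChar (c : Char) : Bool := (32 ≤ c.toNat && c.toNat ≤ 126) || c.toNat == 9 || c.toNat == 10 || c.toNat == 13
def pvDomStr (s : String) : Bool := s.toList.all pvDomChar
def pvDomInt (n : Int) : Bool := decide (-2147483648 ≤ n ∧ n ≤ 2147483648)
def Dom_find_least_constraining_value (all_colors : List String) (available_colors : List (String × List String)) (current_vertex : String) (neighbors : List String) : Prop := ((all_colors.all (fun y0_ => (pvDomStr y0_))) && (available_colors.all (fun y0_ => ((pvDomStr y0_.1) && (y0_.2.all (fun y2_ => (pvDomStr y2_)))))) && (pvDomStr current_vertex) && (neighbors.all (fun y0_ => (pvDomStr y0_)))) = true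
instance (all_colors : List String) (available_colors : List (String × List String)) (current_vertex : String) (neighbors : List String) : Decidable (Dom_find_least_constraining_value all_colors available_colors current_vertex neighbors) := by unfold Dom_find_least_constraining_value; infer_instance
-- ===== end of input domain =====

-- ===== PORT A =====
-- B replaces A's counting dict + comparison sort by a flattened demand list and a
-- bucket/counting sort indexed by demand.count(color) (objective: alternative; not claimed faster).
def find_least_constraining_value (all_colors : List String) (available_colors : List (String × List String)) (current_vertex : String) (neighbors : List String) : List String :=
  let avail : PySem.Dict String (List String) := PySem.Dict.mk available_colors
  let count0 : PySem.Dict String Int := all_colors.foldl (fun d color => d.insert color 0) PySem.Dict.empty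
  let count : PySem.Dict String Int := neighbors.foldl (fun d neighbor =>
      if avail.contains neighbor then
        (avail.getD neighbor []).foldl (fun d color => d.modify color 0 (fun v => v + 1)) d
      else d) count0
  PySem.List.sorted count.keys (fun color => count.getD color 0) false

-- ===== PORT B =====
def find_least_constraining_value_alt (all_colors : List String) (available_colors : List (String × List String)) (current_vertex : String) (neighbors : List String) : List String :=
  let avail : PySem.Dict String (List String) := PySem.Dict.mk available_colors
  let demand : List String := neighbors.flatMap (fun nb => if avail.contains nb then avail.getD nb [] else [])
  let buckets0 : List (List String) := List.replicate (demand.length + 1) []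
  let buckets : List (List String) := (PySem.List.dedup all_colors).foldl
      (fun bs color => bs.set (demand.count color) (bs.getD (demand.count color) [] ++ [color])) buckets0
  buckets.flatten

-- ===== PRECONDITION & SPEC =====
-- Pre_ excludes exactly the inputs on which A raises KeyError: a neighbor present in
-- available_colors whose available-color list contains a color not in all_colors.
def Pre_find_least_constraining_value (all_colors : List String) (available_colors : List (String × List String)) (current_vertex : String) (neighbors : List String) : Prop :=
  ∀ neighbor ∈ neighbors, (PySem.Dict.mk available_colors).contains neighbor = true →
    ∀ color ∈ (PySem.Dict.mk available_colors).getD neighbor [], color ∈ all_colors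
instance (all_colors : List String) (available_colors : List (String × List String)) (current_vertex : String) (neighbors : List String) : Decidable (Pre_find_least_constraining_value all_colors available_colors current_vertex neighbors) := by unfold Pre_find_least_constraining_value; infer_instance
def pvWitness_find_least_constraining_value : List String × (List (String × List String)) × String × List String :=
  (["r", "g"], [("v", ["r"])], "u", ["v", "w"])
def Spec_find_least_constraining_value (all_colors : List String) (available_colors : List (String × List String)) (current_vertex : String) (neighbors : List String) (out : List String) : Prop := out = find_least_constraining_value_alt all_colors available_colors current_vertex neighbors
instance (all_colors : List String) (available_colors : List (String × List String)) (current_vertex : String) (neighbors : List String) (out : List String) : Decidable (Spec_find_least_constraining_value all_colors available_colors current_vertex neighbors out) := by unfold Spec_find_least_constraining_value; infer_instance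

-- ===== CLAIM (what is proved, stated in full; the proofs are below) =====
def Claim_equal_find_least_constraining_value : Prop := ∀ (all_colors : List String) (available_colors : List (String × List String)) (current_vertex : String) (neighbors : List String), Dom_find_least_constraining_value all_colors available_colors current_vertex neighbors → Pre_find_least_constraining_value all_colors available_colors current_vertex neighbors → Spec_find_least_constraining_value all_colors available_colors current_vertex neighbors (find_least_constraining_value all_colors available_colors current_vertex neighbors)

-- ===== LEMMAS AND PROOFS =====

-- insertBy passes over a prefix none of whose elements trigger `before`.
theorem pv_insertBy_skip {a : Type} (before : a -> a -> Bool) (x : a) :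
    ∀ (as bs : List a), (∀ y ∈ as, before x y = false) ->
      PySem.List.insertBy before x (as ++ bs) = as ++ PySem.List.insertBy before x bs := by
  intro as
  induction as with
  | nil => intro bs _; simp
  | cons z as ih =>
      intro bs h
      have hz : before x z = false := h z (by simp)
      simp only [List.cons_append, PySem.List.insertBy, hz, Bool.false_eq_true, ite_false]
      simp [ih bs (fun y hy => h y (by simp [hy]))]

-- insertBy puts x in front when every element triggers `before`.
theorem pv_insertBy_front {a : Type} (before : a -> a -> Bool) (x : a) :
    ∀ (bs : List a), (∀ y ∈ bs, before x y = true) ->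
      PySem.List.insertBy before x bs = x :: bs := by
  intro bs h
  cases bs with
  | nil => simp [PySem.List.insertBy]
  | cons z bs => simp [PySem.List.insertBy, h z (by simp)]

-- inserting x into a bucket decomposition appends it to the end of its own bucket
theorem pv_insertBy_flatMap {a : Type} (key : a -> Int) (x : a) (f : Int -> List a) :
    ∀ (cs : List Int), cs.Pairwise (· < ·) -> key x ∈ cs ->
      (∀ c ∈ cs, ∀ y ∈ f c, key y = c) ->
      PySem.List.insertBy (fun p q => decide (key p < key q)) x (cs.flatMap f)
        = cs.flatMap (fun c => if c = key x then f c ++ [x] else f c) := by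
  intro cs
  induction cs with
  | nil => intro _ hmem _; simp at hmem
  | cons c cs ih =>
      intro hpw hmem hf
      obtain ⟨hlt, hpw'⟩ := List.pairwise_cons.mp hpw
      simp only [List.flatMap_cons]
      by_cases hc : c = key x
      · have hskip : ∀ y ∈ f c, (fun p q => decide (key p < key q)) x y = false := by
          intro y hy
          have := hf c (by simp) y hy
          simp [this, hc]
        rw [pv_insertBy_skip _ _ _ _ hskip]
        have hfront : ∀ y ∈ cs.flatMap f, (fun p q => decide (key p < key q)) x y = true := by
          intro y hy
          obtain ⟨c', hc', hy'⟩ := List.mem_flatMap.mp hy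
          have h1 : key y = c' := hf c' (by simp [hc']) y hy'
          have h2 : c < c' := hlt c' hc'
          simp only [decide_eq_true_eq, h1]
          omega
        rw [pv_insertBy_front _ _ _ hfront]
        have hne : cs.flatMap (fun c' => if c' = key x then f c' ++ [x] else f c') = cs.flatMap f := by
          refine List.flatMap_congr (fun c' hc' => ?_)
          have : c' ≠ key x := by have := hlt c' hc'; omega
          simp [this]
        simp [hne, hc]
      · have hmem' : key x ∈ cs := by
          rcases List.mem_cons.mp hmem with h | h
          · exact absurd h.symm hc
          · exact h
        have hskip : ∀ y ∈ f c, (fun p q => decide (key p < key q)) x y = false := by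
          intro y hy
          have h1 : key y = c := hf c (by simp) y hy
          have h2 : c < key x := hlt _ hmem'
          simp only [decide_eq_false_iff_not, h1]
          omega
        rw [pv_insertBy_skip _ _ _ _ hskip]
        rw [ih hpw' hmem' (fun c' hc' => hf c' (by simp [hc']))]
        simp [hc]

theorem pv_pyRange_pairwise (b : Int) : (PySem.List.pyRange 0 b).Pairwise (· < ·) := by
  rw [PySem.List.pyRange_of_pos 0 b (by norm_num)]
  refine List.Pairwise.map _ ?_ List.pairwise_lt_range
  intro i j hij
  show (0:Int) + 1 * (i : Int) < 0 + 1 * (j : Int)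
  omega

-- stable sort by a bounded nonnegative integer key = concatenation of the buckets 0..m
theorem pv_bucket_sorted {a : Type} (key : a -> Int) :
    ∀ (xs : List a) (m : Int), (∀ x ∈ xs, 0 ≤ key x) -> (∀ x ∈ xs, key x ≤ m) ->
      PySem.List.sorted xs key false
        = (PySem.List.pyRange 0 (m + 1)).flatMap (fun c => xs.filter (fun x => key x == c)) := by
  intro xs
  induction xs using List.reverseRecOn with
  | nil => intro m _ _; rw [PySem.List.sorted_eq_foldl_insertBy]; simp
  | append_singleton xs x ih =>
      intro m h0 hm
      have hsort : PySem.List.sorted (xs ++ [x]) key false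
          = PySem.List.insertBy (fun p q => decide (key p < key q)) x (PySem.List.sorted xs key false) := by
        rw [PySem.List.sorted_eq_foldl_insertBy, PySem.List.sorted_eq_foldl_insertBy, List.foldl_append]
        rfl
      rw [hsort, ih m (fun y hy => h0 y (by simp [hy])) (fun y hy => hm y (by simp [hy]))]
      rw [pv_insertBy_flatMap key x _ _ (pv_pyRange_pairwise (m + 1))
            (PySem.List.mem_pyRange_one.mpr ⟨h0 x (by simp), by have := hm x (by simp); omega⟩)
            (fun c _ y hy => by simpa using (List.mem_filter.mp hy).2)]
      refine List.flatMap_congr (fun c _ => ?_)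
      by_cases hc : c = key x
      · simp [hc, List.filter_append]
      · simp [hc, List.filter_append, Ne.symm hc]

theorem pv_getD_insert0 :
    ∀ (l : List String) (d : PySem.Dict String Int), (∀ k, d.getD k 0 = 0) ->
      ∀ k, (l.foldl (fun d color => d.insert color 0) d).getD k 0 = 0 := by
  intro l
  induction l with
  | nil => intro d h k; simpa using h k
  | cons c l ih =>
      intro d h k
      simp only [List.foldl_cons]
      exact ih _ (fun k' => by rw [PySem.Dict.getD_insert]; split <;> simp [h]) k

theorem pv_nested_foldl (P : String -> Bool) (g : String -> List String) :
    ∀ (l : List String) (d : PySem.Dict String Int),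
      l.foldl (fun d nb => if P nb then (g nb).foldl (fun d color => d.modify color 0 (fun v => v + 1)) d else d) d
        = (l.flatMap (fun nb => if P nb then g nb else [])).foldl (fun d color => d.modify color 0 (fun v => v + 1)) d := by
  intro l
  induction l with
  | nil => intro d; simp
  | cons nb l ih =>
      intro d
      simp only [List.foldl_cons, List.flatMap_cons, List.foldl_append]
      by_cases h : P nb = true
      · simp [h, ih]
      · simp [Bool.not_eq_true] at h
        simp [h, ih]

-- Set.update adds nothing when every element is already present
theorem pv_set_update_of_subset :
    ∀ (l s : List String), (∀ x ∈ l, x ∈ s) -> PySem.Set.update s l = s := by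
  intro l
  induction l with
  | nil => intro s _; rfl
  | cons x l ih =>
      intro s h
      have hx : PySem.Set.add s x = s := by
        simp [PySem.Set.add, PySem.Set.contains, h x (by simp)]
      calc PySem.Set.update s (x :: l)
          = PySem.Set.update (PySem.Set.add s x) l := rfl
        _ = s := by rw [hx]; exact ih s (fun y hy => h y (by simp [hy]))

-- flatten as concatenation of the indexed buckets
theorem pv_flatten_eq_flatMap {a : Type} :
    ∀ (l : List (List a)), l.flatten = (List.range l.length).flatMap (fun i => l.getD i []) := by
  intro l
  induction l with
  | nil => simp
  | cons x l ih =>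
      rw [List.flatten_cons, List.length_cons, List.range_succ_eq_map, List.flatMap_cons,
          List.flatMap_map, ih]
      simp [List.getD]

-- the bucket-distribution fold preserves the number of buckets
theorem pv_bucket_fold_length (f : String -> Nat) :
    ∀ (colors : List String) (bs : List (List String)),
      (colors.foldl (fun bs c => bs.set (f c) (bs.getD (f c) [] ++ [c])) bs).length = bs.length := by
  intro colors
  induction colors with
  | nil => intro bs; rfl
  | cons c colors ih => intro bs; rw [List.foldl_cons, ih, List.length_set]

-- the bucket-distribution fold, bucket by bucket: bucket i collects exactly the colors with f = i
theorem pv_bucket_fold_getD (f : String -> Nat) :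
    ∀ (colors : List String) (bs : List (List String)), (∀ c ∈ colors, f c < bs.length) ->
      ∀ i, (colors.foldl (fun bs c => bs.set (f c) (bs.getD (f c) [] ++ [c])) bs).getD i []
        = bs.getD i [] ++ colors.filter (fun c => f c == i) := by
  intro colors
  induction colors with
  | nil => intro bs _ i; simp
  | cons c colors ih =>
      intro bs h i
      simp only [List.foldl_cons]
      rw [ih _ (by intro c' hc'; rw [List.length_set]; exact h c' (by simp [hc']))]
      have hbs : (bs.set (f c) (bs.getD (f c) [] ++ [c])).getD i []
          = bs.getD i [] ++ (if f c == i then [c] else []) := by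
        by_cases hic : i = f c
        · subst hic
          simp [List.getD, List.getElem?_set_self (h c (by simp))]
        · have hne : f c ≠ i := fun hh => hic hh.symm
          simp [List.getD, List.getElem?_set_ne hne, hne]
      rw [hbs, List.filter_cons]
      by_cases hfc : f c == i
      · simp [hfc, List.append_assoc]
      · simp at hfc
        simp [hfc]

-- ===== VERDICT (by name: the statement is the Claim_ definition above) =====
theorem find_least_constraining_value_spec : Claim_equal_find_least_constraining_value := by
  intro all_colors available_colors current_vertex neighbors _dom hpre
  unfold Spec_find_least_constraining_value
  unfold find_least_constraining_value find_least_constraining_value_alt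
  dsimp only
  set avail : PySem.Dict String (List String) := PySem.Dict.mk available_colors with havail
  set demand : List String :=
      neighbors.flatMap (fun nb => if avail.contains nb then avail.getD nb [] else []) with hdemand
  set count0 : PySem.Dict String Int := all_colors.foldl (fun d color => d.insert color 0) PySem.Dict.empty with hc0
  set C : PySem.Dict String Int := neighbors.foldl (fun d neighbor =>
      if avail.contains neighbor then
        (avail.getD neighbor []).foldl (fun d color => d.modify color 0 (fun v => v + 1)) d
      else d) count0 with hC
  have hrw : C = demand.foldl (fun d color => d.modify color 0 (fun v => v + 1)) count0 := by
    rw [hC, pv_nested_foldl]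
  -- the per-color count
  have hget : ∀ k, C.getD k 0 = (demand.count k : Int) := by
    intro k
    rw [hrw, PySem.Dict.getD_foldl_modify_add_one]
    rw [pv_getD_insert0 all_colors PySem.Dict.empty (fun k' => PySem.Dict.getD_empty k' 0)]
    ring
  -- the key list is the ordered dedup of all_colors
  have hkeys0 : count0.keys = PySem.List.dedup all_colors := by
    rw [hc0, PySem.Dict.keys_foldl_insert, PySem.Dict.keys_empty, PySem.List.dedup_eq_ofList,
        PySem.Set.ofList_eq_foldl]
    rfl
  have hdem_mem : ∀ x ∈ demand, x ∈ all_colors := by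
    intro x hx
    obtain ⟨nb, hnb, hx'⟩ := List.mem_flatMap.mp hx
    by_cases h : avail.contains nb = true
    · exact hpre nb hnb h x (by simpa [h] using hx')
    · simp [Bool.not_eq_true] at h
      simp [h] at hx'
  have hkeys : C.keys = PySem.List.dedup all_colors := by
    rw [hrw, PySem.Dict.keys_foldl_modify, hkeys0, pv_set_update_of_subset]
    intro x hx
    rw [PySem.List.mem_dedup]
    exact hdem_mem x hx
  clear_value C
  -- A side: sort = bucket concatenation with bound m = demand.length
  have hle : ∀ k ∈ C.keys, C.getD k 0 ≤ (demand.length : Int) := by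
    intro k _
    rw [hget k]
    exact_mod_cast List.count_le_length
  rw [pv_bucket_sorted (fun k => C.getD k 0) C.keys (demand.length : Int)
        (fun k _ => by show (0:Int) ≤ C.getD k 0; rw [hget k]; positivity)
        (fun k hk => by show C.getD k 0 ≤ _; exact hle k hk)]
  -- B side: flatten of the distributed buckets
  have hlen : ∀ c ∈ PySem.List.dedup all_colors,
      demand.count c < (List.replicate (demand.length + 1) ([] : List String)).length := by
    intro c _
    rw [List.length_replicate]
    exact Nat.lt_succ_of_le List.count_le_length
  rw [pv_flatten_eq_flatMap, pv_bucket_fold_length, List.length_replicate]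
  -- match the two flatMaps index by index
  have hcast : ((demand.length : Int) + 1) = ((demand.length + 1 : Nat) : Int) := by push_cast; ring
  rw [hcast, PySem.List.pyRange_zero_natCast, List.flatMap_map]
  refine List.flatMap_congr (fun i hi => ?_)
  rw [pv_bucket_fold_getD _ _ _ hlen i]
  have hrep : (List.replicate (demand.length + 1) ([] : List String)).getD i [] = [] := by
    simp only [List.getD, List.getElem?_replicate]
    split <;> rfl
  rw [hrep, List.nil_append, hkeys]
  refine List.filter_congr (fun k hk => ?_)
  show (C.getD k 0 == ((i : Int))) = (demand.count k == i)
  rw [hget k]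
  by_cases h : demand.count k = i
  · simp [h]
  · have : ((demand.count k : Int)) ≠ ((i : Int)) := by exact_mod_cast h
    simp [h, this]
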